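-- pv_equiv track=rewrite | github.com/wbor-fm/wbor-rds-encoder | encoder/message_handler.py | _find_fitting_prefix
-- ===== SOURCE A (Python) =====
-- def _find_fitting_prefix(
--     field: str, text: str, max_len: int, ellipsis: str = "..."
-- ) -> str:
--     """Find the longest prefix of a field that fits within truncated text.
--
--     If the field is found, returns the field with ellipsis appended.
--
--     If not found, returns an empty string.
--
--     Args:
--         field: The field to search for.
--         text: The text to search within.
--         max_len: The maximum length of the field.
--         ellipsis: The ellipsis to append if truncated.
--
--     Returns:
--         The fitting prefix of the field or an empty string.
--     """
--     for i in range(max_len, 0, -1):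
--         candidate = field[:i]
--         if candidate in text:
--             return candidate + ellipsis
--     return ""
-- ===== SOURCE B (Python) =====
-- def _find_fitting_prefix(
--     field: str, text: str, max_len: int, ellipsis: str = "..."
-- ) -> str:
--     """Binary search on the prefix length: 'field[:i] in text' is monotone in i
--     (a prefix of an occurring string also occurs), so the longest fitting
--     prefix length is found with O(log(max_len)) containment tests."""
--     if max_len <= 0:
--         return ""
--     lo, hi = 0, max_len
--     while lo < hi:
--         mid = (lo + hi + 1) // 2
--         if field[:mid] in text:
--             lo = mid
--         else:
--             hi = mid - 1
--     return field[:lo] + ellipsis if lo > 0 else ""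
-- ===== Notes on version B (the rewrite author's own statement) =====
-- stated objective: faster
-- what changed: Replaced A's linear downward scan over candidate prefix lengths with a binary search on the prefix length, valid because containment of field[:i] in text is antitone in i (a prefix of an occurring string also occurs).
import Mathlib
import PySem

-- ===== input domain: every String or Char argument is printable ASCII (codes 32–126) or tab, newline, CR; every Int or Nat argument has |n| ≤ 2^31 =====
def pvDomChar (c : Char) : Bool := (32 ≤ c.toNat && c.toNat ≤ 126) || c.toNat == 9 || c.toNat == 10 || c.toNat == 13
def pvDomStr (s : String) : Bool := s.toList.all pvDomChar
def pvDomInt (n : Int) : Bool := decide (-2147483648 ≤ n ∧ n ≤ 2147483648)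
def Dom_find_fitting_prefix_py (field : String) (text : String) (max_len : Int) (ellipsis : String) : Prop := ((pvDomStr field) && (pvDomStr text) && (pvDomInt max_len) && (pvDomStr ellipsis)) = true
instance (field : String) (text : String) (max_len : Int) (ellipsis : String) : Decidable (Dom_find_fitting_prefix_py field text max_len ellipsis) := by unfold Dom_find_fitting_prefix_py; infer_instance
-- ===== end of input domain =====

-- B replaces A's linear downward scan over candidate prefix lengths by a binary search on the
-- prefix length (containment of field[:i] in text is antitone in i), an asymptotically faster
-- exact re-implementation; return values agree on all inputs.

-- ===== PORT A =====
-- for i in range(max_len, 0, -1): candidate = field[:i]; if candidate in text: return candidate + ellipsis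
def pvA_loop (field text ellipsis : String) : List Int → String
  | [] => ""
  | i :: rest =>
    let candidate := PySem.Str.slice field none (some i)
    if PySem.Str.isIn candidate text then candidate ++ ellipsis
    else pvA_loop field text ellipsis rest

def find_fitting_prefix_py (field : String) (text : String) (max_len : Int) (ellipsis : String) : String :=
  pvA_loop field text ellipsis (PySem.List.pyRange max_len 0 (-1))

-- ===== PORT B =====
-- while lo < hi: mid = (lo+hi+1)//2; if field[:mid] in text: lo = mid else: hi = mid-1
-- (the while loop is ported with explicit fuel hi-lo, an upper bound on its iteration count)
def pvB_go (field text : String) : Nat → Int → Int → Int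
  | 0, lo, _ => lo
  | fuel + 1, lo, hi =>
    if lo < hi then
      let mid := PySem.Int.floordiv (lo + hi + 1) 2
      if PySem.Str.isIn (PySem.Str.slice field none (some mid)) text then
        pvB_go field text fuel mid hi
      else
        pvB_go field text fuel lo (mid - 1)
    else lo

def pvB_search (field text : String) (lo hi : Int) : Int :=
  pvB_go field text (hi - lo).toNat lo hi

def find_fitting_prefix_py_alt (field : String) (text : String) (max_len : Int) (ellipsis : String) : String :=
  if max_len ≤ 0 then ""
  else
    let lo := pvB_search field text 0 max_len
    if 0 < lo then PySem.Str.slice field none (some lo) ++ ellipsis else ""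

-- ===== PRECONDITION & SPEC =====
def Spec_find_fitting_prefix_py (field : String) (text : String) (max_len : Int) (ellipsis : String) (out : String) : Prop := out = find_fitting_prefix_py_alt field text max_len ellipsis
instance (field : String) (text : String) (max_len : Int) (ellipsis : String) (out : String) : Decidable (Spec_find_fitting_prefix_py field text max_len ellipsis out) := by unfold Spec_find_fitting_prefix_py; infer_instance

-- ===== CLAIM (what is proved, stated in full; the proofs are below) =====
def Claim_equal_find_fitting_prefix_py : Prop := ∀ (field : String) (text : String) (max_len : Int) (ellipsis : String), Dom_find_fitting_prefix_py field text max_len ellipsis → Spec_find_fitting_prefix_py field text max_len ellipsis (find_fitting_prefix_py field text max_len ellipsis)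

-- ===== LEMMAS AND PROOFS =====

-- the loop predicate of both programs: "field[:n] in text", for a natural prefix length n
def pvP (field text : String) (n : Nat) : Bool :=
  PySem.Str.isIn (PySem.Str.slice field none (some (n : Int))) text

theorem pvP_iff (field text : String) (n : Nat) :
    pvP field text n = true ↔ field.toList.take n <:+: text.toList := by
  rw [pvP, PySem.Str.isIn_iff_infix, PySem.Str.toList_slice,
    PySem.Chars.slice_eq_listSlice, PySem.List.slice_to_natCast]

theorem pvP_zero (field text : String) : pvP field text 0 = true := by
  rw [pvP_iff]; simp

theorem pvP_mono (field text : String) {i j : Nat} (hij : i ≤ j)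
    (h : pvP field text j = true) : pvP field text i = true := by
  rw [pvP_iff] at h ⊢
  exact ((List.take_prefix_take_left hij).isInfix).trans h

-- unfolding equation for pvB_go at positive fuel (zeta-reduced, plain ite)
theorem pvB_go_eq (field text : String) (fuel : Nat) (lo hi : Int) :
    pvB_go field text (fuel + 1) lo hi =
      if lo < hi then
        (if PySem.Str.isIn
            (PySem.Str.slice field none (some (PySem.Int.floordiv (lo + hi + 1) 2))) text then
          pvB_go field text fuel (PySem.Int.floordiv (lo + hi + 1) 2) hi
        else pvB_go field text fuel lo (PySem.Int.floordiv (lo + hi + 1) 2 - 1))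
      else lo := by
  rw [pvB_go]

-- binary-search correctness: with enough fuel, pvB_go returns the greatest n in [lo, hi] with pvP
theorem pvB_spec (field text : String) :
    ∀ (fuel : Nat) (lo hi : Int), (hi - lo).toNat ≤ fuel → 0 ≤ lo → lo ≤ hi →
    pvP field text lo.toNat = true →
    lo ≤ pvB_go field text fuel lo hi ∧ pvB_go field text fuel lo hi ≤ hi ∧
    pvP field text (pvB_go field text fuel lo hi).toNat = true ∧
    ∀ j : Nat, pvB_go field text fuel lo hi < (j : Int) → (j : Int) ≤ hi →
      pvP field text j = false := by
  intro fuel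
  induction fuel with
  | zero =>
    intro lo hi hf h0 hlh hP
    rw [pvB_go]
    refine ⟨le_refl _, hlh, hP, ?_⟩
    intro j hj1 hj2; omega
  | succ n ih =>
    intro lo hi hf h0 hlh hP
    by_cases hlt : lo < hi
    · rw [pvB_go_eq, if_pos hlt]
      have hmid : PySem.Int.floordiv (lo + hi + 1) 2 = (lo + hi + 1) / 2 :=
        PySem.Int.floordiv_eq_ediv_of_pos (by norm_num)
      set mid := PySem.Int.floordiv (lo + hi + 1) 2 with hmiddef
      have hb1 : lo < mid := by rw [hmid]; omega
      have hb2 : mid ≤ hi := by rw [hmid]; omega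
      have hcast : ((mid.toNat : Nat) : Int) = mid := Int.toNat_of_nonneg (by omega)
      have hcond : PySem.Str.isIn (PySem.Str.slice field none (some mid)) text
          = pvP field text mid.toNat := by rw [pvP, hcast]
      by_cases hc : pvP field text mid.toNat = true
      · rw [hcond, if_pos hc]
        have hfu : (hi - mid).toNat ≤ n := by rw [hmid] at hb1 ⊢; omega
        obtain ⟨r1, r2, r3, r4⟩ := ih mid hi hfu (by omega) hb2 hc
        exact ⟨by omega, r2, r3, r4⟩
      · have hcF : pvP field text mid.toNat = false := by
          cases h : pvP field text mid.toNat with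
          | false => rfl
          | true => exact absurd h hc
        rw [hcond, if_neg (by simp [hcF])]
        have hfu : (mid - 1 - lo).toNat ≤ n := by rw [hmid] at hb2 ⊢; omega
        obtain ⟨r1, r2, r3, r4⟩ := ih lo (mid - 1) hfu h0 (by omega) hP
        refine ⟨r1, by omega, r3, ?_⟩
        intro j hj1 hj2
        by_cases hjm : (j : Int) ≤ mid - 1
        · exact r4 j hj1 hjm
        · cases h : pvP field text j with
          | false => rfl
          | true =>
            have : pvP field text mid.toNat = true :=
              pvP_mono field text (by omega) h
            rw [hcF] at this; exact absurd this (by simp)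
    · rw [pvB_go_eq, if_neg hlt]
      refine ⟨le_refl _, hlh, hP, ?_⟩
      intro j hj1 hj2; omega

-- A's downward scan as a structural recursion on the top candidate length
def pvAFun (field text ellipsis : String) : Nat → String
  | 0 => ""
  | n + 1 =>
    if pvP field text (n + 1) then
      PySem.Str.slice field none (some ((n + 1 : Nat) : Int)) ++ ellipsis
    else pvAFun field text ellipsis n

theorem pvA_loop_eq_AFun (field text ellipsis : String) :
    ∀ n : Nat, pvA_loop field text ellipsis (PySem.List.pyRange (n : Int) 0 (-1))
      = pvAFun field text ellipsis n := by
  intro n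
  induction n with
  | zero => rw [PySem.List.pyRange_neg_one_eq_nil (by norm_num)]; rfl
  | succ k ih =>
    rw [PySem.List.pyRange_neg_one_cons (by exact_mod_cast Nat.succ_pos k)]
    show (if PySem.Str.isIn (PySem.Str.slice field none (some ((k + 1 : Nat) : Int))) text then
        PySem.Str.slice field none (some ((k + 1 : Nat) : Int)) ++ ellipsis
      else pvA_loop field text ellipsis (PySem.List.pyRange (((k + 1 : Nat) : Int) - 1) 0 (-1)))
      = pvAFun field text ellipsis (k + 1)
    have hc : (((k + 1 : Nat) : Int) - 1) = (k : Int) := by push_cast; ring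
    rw [hc, ih, pvAFun, pvP]

theorem pvAFun_stable (field text ellipsis : String) :
    ∀ (n r : Nat), r ≤ n → (∀ j : Nat, r < j → j ≤ n → pvP field text j = false) →
    pvAFun field text ellipsis n = pvAFun field text ellipsis r := by
  intro n
  induction n with
  | zero => intro r hr _; interval_cases r; rfl
  | succ k ih =>
    intro r hr hF
    by_cases hrk : r = k + 1
    · rw [hrk]
    · have hF1 : pvP field text (k + 1) = false := hF (k + 1) (by omega) (le_refl _)
      rw [pvAFun, hF1]
      simp only [Bool.false_eq_true, if_false]
      exact ih r (by omega) (fun j h1 h2 => hF j h1 (by omega))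

theorem pvAFun_at (field text ellipsis : String) (r : Nat)
    (hP : pvP field text r = true) :
    pvAFun field text ellipsis r =
      if 0 < r then PySem.Str.slice field none (some (r : Int)) ++ ellipsis else "" := by
  cases r with
  | zero => rfl
  | succ k => rw [pvAFun, hP]; simp

-- ===== VERDICT (by name: the statement is the Claim_ definition above) =====
theorem find_fitting_prefix_py_spec : Claim_equal_find_fitting_prefix_py := by
  intro field text max_len ellipsis _hdom
  unfold Spec_find_fitting_prefix_py find_fitting_prefix_py find_fitting_prefix_py_alt
  by_cases hml : max_len ≤ 0
  · rw [if_pos hml, PySem.List.pyRange_neg_one_eq_nil (by omega)]; rfl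
  · rw [if_neg hml]
    have hml' : 0 < max_len := by omega
    have hm : ((max_len.toNat : Nat) : Int) = max_len := Int.toNat_of_nonneg (by omega)
    have hunf : pvB_search field text 0 max_len
        = pvB_go field text (max_len - 0).toNat 0 max_len := rfl
    obtain ⟨r1, r2, r3, r4⟩ :=
      pvB_spec field text (max_len - 0).toNat 0 max_len (le_refl _) (le_refl _)
        (by omega) (pvP_zero field text)
    rw [← hunf] at r1 r2 r3 r4
    set r := pvB_search field text 0 max_len with hrdef
    have hrc : ((r.toNat : Nat) : Int) = r := Int.toNat_of_nonneg r1
    rw [← hm, pvA_loop_eq_AFun]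
    rw [pvAFun_stable field text ellipsis max_len.toNat r.toNat (by omega)
      (fun j h1 h2 => r4 j (by omega) (by omega))]
    rw [pvAFun_at field text ellipsis r.toNat r3, hrc]
    by_cases h0 : 0 < r
    · rw [if_pos (by omega), if_pos h0]
    · rw [if_neg (by omega), if_neg h0]
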